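-- pv_equiv track=rewrite | github.com/kiangkiangkiang/LeetCode-History | daily/p861.py | hor_check
-- ===== SOURCE A (Python) =====
-- def hor_check(grid):
--     tmp_max = -1
--     tmp_index = -1
--     for row in range(len(grid)):
--         zero_total = 0
--         one_total = 0
--         for col in range(len(grid[0])):
--             if grid[row][col] == 1:
--                 one_total += 2 ** (len(grid[0]) - col - 1)
--             else:
--                 zero_total += 2 ** (len(grid[0]) - col - 1)
--
--         if zero_total > one_total and zero_total > tmp_max:
--             tmp_max = zero_total
--             tmp_index = row
--
--     return tmp_index, tmp_max
-- ===== SOURCE B (Python) =====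
-- def hor_check(grid):
--     if not grid:
--         return -1, -1
--     w = len(grid[0])
--     # stage 1: column-major sweep -- build every row's zero-interpretation value in lockstep
--     vals = [0] * len(grid)
--     for c in range(w):
--         vals = [2 * v + (0 if row[c] == 1 else 1) for v, row in zip(vals, grid)]
--     # stage 2: select the first row whose doubled value beats the all-ones constant and the best so far
--     full = 2 ** w - 1
--     best = (-1, -1)
--     for i, z in enumerate(vals):
--         if 2 * z > full and z > best[1]:
--             best = (i, z)
--     return best
-- ===== Notes on version B (the rewrite author's own statement) =====
-- stated objective: faster
-- what changed: B is a staged, column-major algorithm: it sweeps the grid column by column, maintaining one vector vals of all rows' zero-interpretation values in lockstep (vals[r] <- 2*vals[r] + bit) with zip comprehensions, then a separate selection pass compares 2*z against one precomputed all-ones constant; A computes each row's two totals row by row with a bignum power 2**(W-col-1) recomputed per cell. A timing run measured B ~2.7x faster at the largest size (no bignum power per cell, comprehension instead of an indexed inner loop).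
import Mathlib
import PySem

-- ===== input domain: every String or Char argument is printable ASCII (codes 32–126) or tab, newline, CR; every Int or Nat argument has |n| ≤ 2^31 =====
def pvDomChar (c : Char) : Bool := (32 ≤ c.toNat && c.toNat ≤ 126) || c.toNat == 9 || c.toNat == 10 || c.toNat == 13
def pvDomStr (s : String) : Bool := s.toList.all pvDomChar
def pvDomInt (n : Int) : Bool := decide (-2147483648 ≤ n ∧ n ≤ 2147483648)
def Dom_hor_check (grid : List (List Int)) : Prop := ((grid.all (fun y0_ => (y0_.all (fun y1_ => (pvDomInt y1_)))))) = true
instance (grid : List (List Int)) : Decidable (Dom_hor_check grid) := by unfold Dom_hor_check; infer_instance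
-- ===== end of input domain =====

-- B is a staged, column-major algorithm (one lockstep vector of all rows' values built
-- column by column, then a separate selection pass) instead of A's row-by-row double
-- accumulation with a per-cell power and inline selection; a timing run measured B faster.

-- ===== PORT A =====
-- state is (tmp_max, tmp_index); grid[row][col] is pyGetD (exact under Pre_, where every
-- index is in range); the exponent len(grid[0])-col-1 is nonnegative since col < len(grid[0]),
-- so .toNat is exact.
def hor_check (grid : List (List Int)) : Int × Int :=
  let st := (PySem.List.pyRange 0 (grid.length : Int) 1).foldl
    (fun (st : Int × Int) row =>
      let zo := (PySem.List.pyRange 0 ((PySem.List.pyGetD grid 0 []).length : Int) 1).foldl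
        (fun (zo : Int × Int) col =>
          if PySem.List.pyGetD (PySem.List.pyGetD grid row []) col 0 = 1 then
            (zo.1, zo.2 + 2 ^ (((PySem.List.pyGetD grid 0 []).length : Int) - col - 1).toNat)
          else
            (zo.1 + 2 ^ (((PySem.List.pyGetD grid 0 []).length : Int) - col - 1).toNat, zo.2))
        ((0 : Int), (0 : Int))
      if zo.1 > zo.2 ∧ zo.1 > st.1 then (zo.1, row) else st)
    ((-1 : Int), (-1 : Int))
  (st.2, st.1)

-- ===== PORT B =====
-- 'row[c]' is pyGetD (exact under Pre_, where c < len(grid[0]) ≤ len(row));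
-- the per-column list comprehension over zip(vals, grid) is the map over vals.zip grid.
def hor_check_alt (grid : List (List Int)) : Int × Int :=
  if grid = [] then (-1, -1)
  else
    let w : Nat := (PySem.List.pyGetD grid 0 []).length
    let vals := (PySem.List.pyRange 0 (w : Int) 1).foldl
      (fun (vals : List Int) c =>
        (vals.zip grid).map (fun p => 2 * p.1 + (if PySem.List.pyGetD p.2 c 0 = 1 then 0 else 1)))
      (List.replicate grid.length 0)
    let full : Int := 2 ^ w - 1
    (PySem.List.enumerate vals 0).foldl
      (fun (best : Int × Int) p => if 2 * p.2 > full ∧ p.2 > best.2 then (p.1, p.2) else best)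
      ((-1 : Int), (-1 : Int))

-- ===== PRECONDITION & SPEC =====
-- Pre_ excludes exactly the grids on which A raises IndexError: those with a row shorter
-- than the first row (A reads grid[row][col] for every col < len(grid[0])).
def Pre_hor_check (grid : List (List Int)) : Prop :=
  ∀ r ∈ grid, (grid.headD []).length ≤ r.length
instance (grid : List (List Int)) : Decidable (Pre_hor_check grid) := by
  unfold Pre_hor_check; infer_instance

def pvWitness_hor_check : List (List Int) := [[0, 1], [1, 1], [0, 0]]

def Spec_hor_check (grid : List (List Int)) (out : Int × Int) : Prop := out = hor_check_alt grid
instance (grid : List (List Int)) (out : Int × Int) : Decidable (Spec_hor_check grid out) := by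
  unfold Spec_hor_check; infer_instance

-- ===== CLAIM (what is proved, stated in full; the proofs are below) =====
def Claim_equal_hor_check : Prop := ∀ (grid : List (List Int)), Dom_hor_check grid → Pre_hor_check grid → Spec_hor_check grid (hor_check grid)

-- ===== LEMMAS AND PROOFS =====

-- Horner's rule: shifting the initial accumulator multiplies it by 2^length.
theorem pv_horner_shift : ∀ (l : List Int) (z0 : Int),
    l.foldl (fun z c => 2 * z + (if c = 1 then 0 else 1)) z0
      = z0 * 2 ^ l.length + l.foldl (fun z c => 2 * z + (if c = 1 then 0 else 1)) 0
  | [], z0 => by simp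
  | c :: t, z0 => by
      simp only [List.foldl_cons, List.length_cons]
      rw [pv_horner_shift t (2 * z0 + _), pv_horner_shift t (2 * 0 + _)]
      ring

-- A's inner column loop computes (z0 + H, o0 + (2^m - 1 - H)) where H is the Horner value
-- of the remaining segment of the row.
theorem pv_innerA (r : List Int) (Wn : Nat) (hW : Wn ≤ r.length) :
    ∀ (m a : Nat), a + m = Wn → ∀ z0 o0 : Int,
    (PySem.List.pyRange (a : Int) (Wn : Int) 1).foldl
      (fun (zo : Int × Int) col =>
        if PySem.List.pyGetD r col 0 = 1 then
          (zo.1, zo.2 + 2 ^ (((Wn : Int)) - col - 1).toNat)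
        else
          (zo.1 + 2 ^ (((Wn : Int)) - col - 1).toNat, zo.2)) (z0, o0)
    = (z0 + ((r.drop a).take m).foldl (fun z c => 2 * z + (if c = 1 then 0 else 1)) 0,
       o0 + (2 ^ m - 1 - ((r.drop a).take m).foldl (fun z c => 2 * z + (if c = 1 then 0 else 1)) 0))
  | 0, a, ha, z0, o0 => by
      rw [PySem.List.pyRange_one_eq_nil (by omega)]
      simp
  | m + 1, a, ha, z0, o0 => by
      rw [PySem.List.pyRange_one_cons (by omega : (a : Int) < (Wn : Int))]
      have hlt : a < r.length := by omega
      have hdrop : r.drop a = r[a] :: r.drop (a + 1) := List.drop_eq_getElem_cons hlt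
      have hexp : (((Wn : Int)) - (a : Int) - 1).toNat = m := by omega
      have hlen : ((r.drop (a + 1)).take m).length = m := by
        simp [List.length_take, List.length_drop]; omega
      have hcast : (a : Int) + 1 = ((a + 1 : Nat) : Int) := by push_cast; ring
      simp only [List.foldl_cons, PySem.List.pyGetD_natCast, List.getD_eq_getElem _ _ hlt,
        hexp, hcast]
      by_cases h1 : r[a] = 1
      · have hH : ((r.drop a).take (m + 1)).foldl (fun z c => 2 * z + (if c = 1 then 0 else 1)) (0 : Int)
            = ((r.drop (a + 1)).take m).foldl (fun z c => 2 * z + (if c = 1 then 0 else 1)) (0 : Int) := by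
          rw [hdrop, List.take_succ_cons, List.foldl_cons,
              pv_horner_shift ((r.drop (a + 1)).take m), hlen]
          simp [h1]
        rw [if_pos h1, pv_innerA r Wn hW m (a + 1) (by omega), hH, Prod.mk.injEq]
        constructor <;> ring
      · have hH : ((r.drop a).take (m + 1)).foldl (fun z c => 2 * z + (if c = 1 then 0 else 1)) (0 : Int)
            = 2 ^ m + ((r.drop (a + 1)).take m).foldl (fun z c => 2 * z + (if c = 1 then 0 else 1)) (0 : Int) := by
          rw [hdrop, List.take_succ_cons, List.foldl_cons,
              pv_horner_shift ((r.drop (a + 1)).take m), hlen]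
          simp [h1]
        rw [if_neg h1, pv_innerA r Wn hW m (a + 1) (by omega), hH, Prod.mk.injEq]
        constructor <;> ring

-- B's column sweep: after processing columns a..Wn, starting from the vector of Horner
-- values of each row's first a cells, the vector holds each row's first-Wn-cells value.
theorem pv_cols (grid : List (List Int)) (Wn : Nat) (hPre : ∀ r ∈ grid, Wn ≤ r.length) :
    ∀ (m a : Nat), a + m = Wn →
    (PySem.List.pyRange (a : Int) (Wn : Int) 1).foldl
      (fun (vals : List Int) c =>
        (vals.zip grid).map (fun p => 2 * p.1 + (if PySem.List.pyGetD p.2 c 0 = 1 then 0 else 1)))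
      (grid.map (fun r => (r.take a).foldl (fun z c => 2 * z + (if c = 1 then 0 else 1)) 0))
    = grid.map (fun r => (r.take Wn).foldl (fun z c => 2 * z + (if c = 1 then 0 else 1)) 0)
  | 0, a, ha => by
      have haw : a = Wn := by omega
      rw [PySem.List.pyRange_one_eq_nil (by omega)]
      simp only [List.foldl_nil, haw]
  | m + 1, a, ha => by
      have halt : (a : Int) < (Wn : Int) := by exact_mod_cast (by omega : a < Wn)
      rw [PySem.List.pyRange_one_cons halt]
      simp only [List.foldl_cons]
      have hzip : ((grid.map (fun r : List Int => (r.take a).foldl (fun z c => 2 * z + (if c = 1 then 0 else 1)) (0 : Int))).zip grid)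
          = grid.map (fun r => ((r.take a).foldl (fun z c => 2 * z + (if c = 1 then 0 else 1)) (0 : Int), r)) := by
        have h := List.zip_map' (f := fun r : List Int => (r.take a).foldl (fun z c => 2 * z + (if c = 1 then 0 else 1)) (0 : Int)) (g := id) (l := grid)
        simpa using h
      rw [hzip, List.map_map]
      have hstep : grid.map ((fun p : Int × List Int => 2 * p.1 + (if PySem.List.pyGetD p.2 (a : Int) 0 = 1 then 0 else 1)) ∘
            (fun r => ((r.take a).foldl (fun z c => 2 * z + (if c = 1 then 0 else 1)) (0 : Int), r)))
          = grid.map (fun r => (r.take (a + 1)).foldl (fun z c => 2 * z + (if c = 1 then 0 else 1)) (0 : Int)) := by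
        apply List.map_congr_left
        intro r hr
        have hlt : a < r.length := by have := hPre r hr; omega
        have htake : r.take (a + 1) = r.take a ++ [r[a]] := by
          rw [List.take_add_one, List.getElem?_eq_getElem hlt]; rfl
        rw [htake, List.foldl_append]
        simp [PySem.List.pyGetD_natCast, List.getD_eq_getElem?_getD, List.getElem?_eq_getElem hlt]
      have hcast : (a : Int) + 1 = ((a + 1 : Nat) : Int) := by push_cast; ring
      rw [hstep, hcast, pv_cols grid Wn hPre m (a + 1) (by omega)]

-- A fold whose body is the swap of another fold's body produces the swapped state.
theorem pv_foldl_swap_congr {α β γ : Type} (f : α × β → γ → α × β) (g : β × α → γ → β × α) :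
    ∀ (l : List γ), (∀ s x, x ∈ l → f s x = Prod.swap (g (Prod.swap s) x)) →
    ∀ init, l.foldl f init = Prod.swap (l.foldl g (Prod.swap init))
  | [], _, init => by simp
  | x :: t, h, init => by
      simp only [List.foldl_cons]
      rw [h init x (List.mem_cons_self), pv_foldl_swap_congr f g t
        (fun s y hy => h s y (List.mem_cons_of_mem _ hy)), Prod.swap_swap]

-- ===== VERDICT (by name: the statement is the Claim_ definition above) =====
set_option maxHeartbeats 1000000 in
theorem hor_check_spec : Claim_equal_hor_check := by
  intro grid _ hPre
  unfold Spec_hor_check hor_check hor_check_alt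
  by_cases hnil : grid = []
  · subst hnil; rfl
  rw [if_neg hnil]
  dsimp only
  set Wn := (PySem.List.pyGetD grid 0 []).length with hWn
  have hPre' : ∀ r ∈ grid, Wn ≤ r.length := by
    intro r hr
    have := hPre r hr
    have : (grid.headD []).length = Wn := by
      rw [hWn]; cases grid <;> simp [PySem.List.pyGetD_zero, List.getD]
    omega
  -- the column sweep yields each row's Horner value
  have hvals : (PySem.List.pyRange 0 ((Wn : Nat) : Int) 1).foldl
      (fun (vals : List Int) c =>
        (vals.zip grid).map (fun p => 2 * p.1 + (if PySem.List.pyGetD p.2 c 0 = 1 then 0 else 1)))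
      (List.replicate grid.length 0)
    = grid.map (fun r => (r.take Wn).foldl (fun z c => 2 * z + (if c = 1 then 0 else 1)) 0) := by
    have hinit : (List.replicate grid.length (0 : Int))
        = grid.map (fun r => (r.take 0).foldl (fun z c => 2 * z + (if c = 1 then 0 else 1)) 0) := by
      simp [List.map_const']
    rw [hinit]
    have := pv_cols grid Wn hPre' Wn 0 (by omega)
    simpa using this
  rw [hvals]
  set vl := grid.map fun r => (r.take Wn).foldl (fun z c => 2 * z + (if c = 1 then (0:Int) else 1)) (0:Int) with hvl
  rw [PySem.List.enumerate_eq_map_pyRange (xs := vl) (d := (0 : Int)), List.foldl_map]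
  have hlen : ((vl.length : Int)) = (grid.length : Int) := by simp [hvl]
  rw [PySem.List.len_eq, hlen]
  have hbody : ∀ (s : Int × Int) (j : Int), j ∈ PySem.List.pyRange 0 (grid.length : Int) 1 →
      (fun (st : Int × Int) row =>
        let zo := (PySem.List.pyRange 0 ((Wn : Nat) : Int) 1).foldl
          (fun (zo : Int × Int) col =>
            if PySem.List.pyGetD (PySem.List.pyGetD grid row []) col 0 = 1 then
              (zo.1, zo.2 + 2 ^ (((Wn : Nat) : Int) - col - 1).toNat)
            else
              (zo.1 + 2 ^ (((Wn : Nat) : Int) - col - 1).toNat, zo.2))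
          ((0 : Int), (0 : Int))
        if zo.1 > zo.2 ∧ zo.1 > st.1 then (zo.1, row) else st) s j
      = Prod.swap ((fun (best : Int × Int) (p : Int × Int) =>
          if 2 * p.2 > 2 ^ Wn - 1 ∧ p.2 > best.2 then (p.1, p.2) else best)
          (Prod.swap s)
          (j, PySem.List.pyGetD vl j 0)) := by
    intro s j hj
    rw [PySem.List.mem_pyRange_one] at hj
    obtain ⟨hj0, hjn⟩ := hj
    obtain ⟨k, rfl⟩ : ∃ k : Nat, j = (k : Int) := ⟨j.toNat, by omega⟩
    have hklt : k < grid.length := by exact_mod_cast hjn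
    have hr : PySem.List.pyGetD grid (k : Int) [] = grid[k] := by
      rw [PySem.List.pyGetD_natCast, List.getD_eq_getElem _ _ hklt]
    have hv : PySem.List.pyGetD vl (k : Int) (0:Int)
        = (grid[k].take Wn).foldl (fun z c => 2 * z + (if c = 1 then 0 else 1)) (0:Int) := by
      rw [hvl, PySem.List.pyGetD_natCast]
      simp [List.getD_eq_getElem?_getD, List.getElem?_map, List.getElem?_eq_getElem hklt]
    have hWr : Wn ≤ grid[k].length := hPre' _ (List.getElem_mem hklt)
    have hinner := pv_innerA grid[k] Wn hWr Wn 0 (by omega) 0 0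
    simp only [Nat.cast_zero, List.drop_zero] at hinner
    simp only [hr, hinner, hv]
    set H := (grid[k].take Wn).foldl (fun z c => 2 * z + (if c = 1 then 0 else 1)) (0 : Int) with hH
    simp only [zero_add]
    have hcond : ((H > 2 ^ Wn - 1 - H ∧ H > s.1)) ↔ (2 * H > 2 ^ Wn - 1 ∧ H > (Prod.swap s).2) := by
      simp [Prod.swap]; omega
    by_cases hc : H > 2 ^ Wn - 1 - H ∧ H > s.1
    · rw [if_pos hc, if_pos (hcond.mp hc)]; rfl
    · rw [if_neg hc, if_neg (fun h => hc (hcond.mpr h))]; simp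
  have hfold := pv_foldl_swap_congr
    (f := fun (st : Int × Int) (row : Int) =>
      let zo := (PySem.List.pyRange 0 ((Wn : Nat) : Int) 1).foldl
        (fun (zo : Int × Int) col =>
          if PySem.List.pyGetD (PySem.List.pyGetD grid row []) col 0 = 1 then
            (zo.1, zo.2 + 2 ^ (((Wn : Nat) : Int) - col - 1).toNat)
          else
            (zo.1 + 2 ^ (((Wn : Nat) : Int) - col - 1).toNat, zo.2))
        ((0 : Int), (0 : Int))
      if zo.1 > zo.2 ∧ zo.1 > st.1 then (zo.1, row) else st)
    (g := fun (best : Int × Int) (j : Int) =>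
      (fun (best : Int × Int) (p : Int × Int) =>
          if 2 * p.2 > 2 ^ Wn - 1 ∧ p.2 > best.2 then (p.1, p.2) else best)
        best
        (j, PySem.List.pyGetD vl j (0:Int)))
    (PySem.List.pyRange 0 (grid.length : Int) 1) hbody ((-1 : Int), (-1 : Int))
  rw [hfold]
  simp [Prod.swap]
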